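-- pv_equiv track=rewrite | github.com/fjkiani/lotto-machine | backtesting/simulation/production_replay.py | _analyze_threshold_hits
-- ===== SOURCE A (Python) =====
-- from typing import List, Dict, Optional
--
-- def _analyze_threshold_hits(dp_levels: List[Dict]) -> Dict[str, int]:
--     """Analyze how many levels hit different thresholds"""
--     hits = {
--         '500k_plus': 0,
--         '1m_plus': 0,
--         '2m_plus': 0,
--         '5m_plus': 0
--     }
--
--     for level in dp_levels:
--         volume = level.get('volume', 0)
--         if volume >= 5_000_000:
--             hits['5m_plus'] += 1
--         if volume >= 2_000_000:
--             hits['2m_plus'] += 1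
--         if volume >= 1_000_000:
--             hits['1m_plus'] += 1
--         if volume >= 500_000:
--             hits['500k_plus'] += 1
--
--     return hits
-- ===== SOURCE B (Python) =====
-- from typing import List, Dict, Optional
--
-- def _analyze_threshold_hits(dp_levels: List[Dict]) -> Dict[str, int]:
--     """Analyze how many levels hit different thresholds (table-driven: one counting pass per threshold)."""
--     thresholds = [
--         ('500k_plus', 500_000),
--         ('1m_plus', 1_000_000),
--         ('2m_plus', 2_000_000),
--         ('5m_plus', 5_000_000),
--     ]
--     return {key: sum(1 for level in dp_levels if level.get('volume', 0) >= t)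
--             for key, t in thresholds}
-- ===== Notes on version B (the rewrite author's own statement) =====
-- stated objective: alternative
-- what changed: The loop nesting is inverted: instead of one pass over levels updating four counters, B iterates over a (key, threshold) table and for each threshold makes a separate counting pass over the levels, building the result dict by comprehension with no mutable counters.
import Mathlib
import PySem

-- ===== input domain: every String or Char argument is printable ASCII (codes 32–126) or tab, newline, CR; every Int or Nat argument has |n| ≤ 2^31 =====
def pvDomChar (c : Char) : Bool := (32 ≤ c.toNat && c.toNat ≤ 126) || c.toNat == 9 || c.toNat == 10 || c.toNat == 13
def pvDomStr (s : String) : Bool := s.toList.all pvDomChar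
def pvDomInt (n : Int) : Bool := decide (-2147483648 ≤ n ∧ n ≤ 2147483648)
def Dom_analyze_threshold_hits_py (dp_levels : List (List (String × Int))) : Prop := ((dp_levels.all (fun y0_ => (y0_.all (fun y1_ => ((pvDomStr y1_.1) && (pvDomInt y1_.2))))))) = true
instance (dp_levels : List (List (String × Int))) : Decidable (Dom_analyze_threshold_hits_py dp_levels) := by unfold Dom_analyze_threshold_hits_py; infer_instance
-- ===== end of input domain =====

-- B inverts the loop nesting: instead of A's single pass over levels updating four counters,
-- it iterates over a (key, threshold) table and counts matching levels in a separate pass per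
-- threshold (alternative decomposition, same result; four passes instead of one).

-- ===== PORT A =====
def analyze_threshold_hits_py (dp_levels : List (List (String × Int))) : List (String × Int) :=
  let hits : PySem.Dict String Int :=
    PySem.Dict.ofList [("500k_plus", 0), ("1m_plus", 0), ("2m_plus", 0), ("5m_plus", 0)]
  let hits := dp_levels.foldl (fun hits level =>
    let volume : Int := (PySem.Dict.mk level).getD "volume" 0
    let hits := if volume ≥ 5000000 then hits.modify "5m_plus" 0 (· + 1) else hits
    let hits := if volume ≥ 2000000 then hits.modify "2m_plus" 0 (· + 1) else hits
    let hits := if volume ≥ 1000000 then hits.modify "1m_plus" 0 (· + 1) else hits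
    if volume ≥ 500000 then hits.modify "500k_plus" 0 (· + 1) else hits) hits
  hits.items

-- ===== PORT B =====
def analyze_threshold_hits_py_alt (dp_levels : List (List (String × Int))) : List (String × Int) :=
  let thresholds : List (String × Int) :=
    [("500k_plus", 500000), ("1m_plus", 1000000), ("2m_plus", 2000000), ("5m_plus", 5000000)]
  thresholds.map (fun kt =>
    (kt.1, dp_levels.foldl (fun acc level =>
      if (PySem.Dict.mk level).getD "volume" 0 ≥ kt.2 then acc + 1 else acc) (0 : Int)))

-- ===== PRECONDITION & SPEC =====
def Spec_analyze_threshold_hits_py (dp_levels : List (List (String × Int))) (out : List (String × Int)) : Prop := out = analyze_threshold_hits_py_alt dp_levels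
instance (dp_levels : List (List (String × Int))) (out : List (String × Int)) : Decidable (Spec_analyze_threshold_hits_py dp_levels out) := by unfold Spec_analyze_threshold_hits_py; infer_instance

-- ===== CLAIM =====
def Claim_equal_analyze_threshold_hits_py : Prop := ∀ (dp_levels : List (List (String × Int))), Dom_analyze_threshold_hits_py dp_levels → Spec_analyze_threshold_hits_py dp_levels (analyze_threshold_hits_py dp_levels)

-- ===== LEMMAS AND PROOFS =====

-- the volume of a level (first match, default 0), shared vocabulary of the proofs
def pvVol (level : List (String × Int)) : Int := (PySem.Dict.mk level).getD "volume" 0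

-- number of levels with volume ≥ t, defined structurally
def pvCnt (t : Int) : List (List (String × Int)) → Int
  | [] => 0
  | l :: ls => (if t ≤ pvVol l then 1 else 0) + pvCnt t ls

-- named copy of A's loop body (definitionally equal to the lambda in the port)
def pvStepA (hits : PySem.Dict String Int) (level : List (String × Int)) : PySem.Dict String Int :=
  let volume : Int := (PySem.Dict.mk level).getD "volume" 0
  let hits := if volume ≥ 5000000 then hits.modify "5m_plus" 0 (· + 1) else hits
  let hits := if volume ≥ 2000000 then hits.modify "2m_plus" 0 (· + 1) else hits
  let hits := if volume ≥ 1000000 then hits.modify "1m_plus" 0 (· + 1) else hits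
  if volume ≥ 500000 then hits.modify "500k_plus" 0 (· + 1) else hits

-- one modify step on the literally-shaped hits dict, per key (values stay variable)
lemma step_500k (a b c d : Int) :
    (PySem.Dict.mk [("500k_plus", a), ("1m_plus", b), ("2m_plus", c), ("5m_plus", d)]).modify
      "500k_plus" 0 (· + 1)
    = PySem.Dict.mk [("500k_plus", a + 1), ("1m_plus", b), ("2m_plus", c), ("5m_plus", d)] := rfl
lemma step_1m (a b c d : Int) :
    (PySem.Dict.mk [("500k_plus", a), ("1m_plus", b), ("2m_plus", c), ("5m_plus", d)]).modify
      "1m_plus" 0 (· + 1)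
    = PySem.Dict.mk [("500k_plus", a), ("1m_plus", b + 1), ("2m_plus", c), ("5m_plus", d)] := rfl
lemma step_2m (a b c d : Int) :
    (PySem.Dict.mk [("500k_plus", a), ("1m_plus", b), ("2m_plus", c), ("5m_plus", d)]).modify
      "2m_plus" 0 (· + 1)
    = PySem.Dict.mk [("500k_plus", a), ("1m_plus", b), ("2m_plus", c + 1), ("5m_plus", d)] := rfl
lemma step_5m (a b c d : Int) :
    (PySem.Dict.mk [("500k_plus", a), ("1m_plus", b), ("2m_plus", c), ("5m_plus", d)]).modify
      "5m_plus" 0 (· + 1)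
    = PySem.Dict.mk [("500k_plus", a), ("1m_plus", b), ("2m_plus", c), ("5m_plus", d + 1)] := rfl

-- A's body on the literally-shaped dict: each cumulative counter gains its indicator
lemma a_step (hd : List (String × Int)) (a b c d : Int) :
    pvStepA (PySem.Dict.mk [("500k_plus", a), ("1m_plus", b), ("2m_plus", c), ("5m_plus", d)]) hd
    = PySem.Dict.mk
        [("500k_plus", a + (if 500000 ≤ pvVol hd then 1 else 0)),
         ("1m_plus", b + (if 1000000 ≤ pvVol hd then 1 else 0)),
         ("2m_plus", c + (if 2000000 ≤ pvVol hd then 1 else 0)),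
         ("5m_plus", d + (if 5000000 ≤ pvVol hd then 1 else 0))] := by
  have hv : (PySem.Dict.mk hd).getD "volume" 0 = pvVol hd := rfl
  simp only [pvStepA, hv, ge_iff_le]
  rcases lt_or_ge (pvVol hd) 500000 with h0 | h0
  · rw [if_neg (show ¬ (5000000:Int) ≤ pvVol hd by omega),
        if_neg (show ¬ (2000000:Int) ≤ pvVol hd by omega),
        if_neg (show ¬ (1000000:Int) ≤ pvVol hd by omega),
        if_neg (show ¬ (500000:Int) ≤ pvVol hd by omega)]
    simp; omega
  · rcases lt_or_ge (pvVol hd) 1000000 with h1 | h1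
    · rw [if_neg (show ¬ (5000000:Int) ≤ pvVol hd by omega),
          if_neg (show ¬ (2000000:Int) ≤ pvVol hd by omega),
          if_neg (show ¬ (1000000:Int) ≤ pvVol hd by omega),
          if_pos (show (500000:Int) ≤ pvVol hd by omega), step_500k]
      simp; omega
    · rcases lt_or_ge (pvVol hd) 2000000 with h2 | h2
      · rw [if_neg (show ¬ (5000000:Int) ≤ pvVol hd by omega),
            if_neg (show ¬ (2000000:Int) ≤ pvVol hd by omega),
            if_pos (show (1000000:Int) ≤ pvVol hd by omega), step_1m,
            if_pos (show (500000:Int) ≤ pvVol hd by omega), step_500k]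
        simp; omega
      · rcases lt_or_ge (pvVol hd) 5000000 with h5 | h5
        · rw [if_neg (show ¬ (5000000:Int) ≤ pvVol hd by omega),
              if_pos (show (2000000:Int) ≤ pvVol hd by omega), step_2m,
              if_pos (show (1000000:Int) ≤ pvVol hd by omega), step_1m,
              if_pos (show (500000:Int) ≤ pvVol hd by omega), step_500k]
          simp; omega
        · rw [if_pos (show (5000000:Int) ≤ pvVol hd by omega), step_5m,
              if_pos (show (2000000:Int) ≤ pvVol hd by omega), step_2m,
              if_pos (show (1000000:Int) ≤ pvVol hd by omega), step_1m,
              if_pos (show (500000:Int) ≤ pvVol hd by omega), step_500k]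
          simp; omega

lemma a_loop (ls : List (List (String × Int))) (a b c d : Int) :
    ls.foldl pvStepA
      (PySem.Dict.mk [("500k_plus", a), ("1m_plus", b), ("2m_plus", c), ("5m_plus", d)])
    = PySem.Dict.mk
        [("500k_plus", a + pvCnt 500000 ls),
         ("1m_plus", b + pvCnt 1000000 ls),
         ("2m_plus", c + pvCnt 2000000 ls),
         ("5m_plus", d + pvCnt 5000000 ls)] := by
  induction ls generalizing a b c d with
  | nil => simp [pvCnt]
  | cons hd tl ih =>
    simp only [List.foldl_cons, pvCnt]
    rw [a_step, ih]
    simp only [PySem.Dict.mk.injEq, List.cons.injEq, Prod.mk.injEq]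
    repeat' apply And.intro
    all_goals first | rfl | trivial | omega | (split_ifs <;> omega)

lemma b_count (t : Int) (ls : List (List (String × Int))) (a : Int) :
    ls.foldl (fun acc level =>
      if (PySem.Dict.mk level).getD "volume" 0 ≥ t then acc + 1 else acc) a
    = a + pvCnt t ls := by
  induction ls generalizing a with
  | nil => simp [pvCnt]
  | cons hd tl ih =>
    simp only [List.foldl_cons, pvCnt, ih]
    have hv : (PySem.Dict.mk hd).getD "volume" 0 = pvVol hd := rfl
    rw [hv]
    split_ifs with h <;> omega

-- ===== VERDICT =====
theorem analyze_threshold_hits_py_spec : Claim_equal_analyze_threshold_hits_py := by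
  intro ls _
  unfold Spec_analyze_threshold_hits_py
  have ha : analyze_threshold_hits_py ls
      = (ls.foldl pvStepA
          (PySem.Dict.mk [("500k_plus", 0), ("1m_plus", 0), ("2m_plus", 0), ("5m_plus", 0)])).items := rfl
  rw [ha, a_loop]
  simp only [analyze_threshold_hits_py_alt, List.map_cons, List.map_nil, b_count]
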